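/-
  jsmn_d.bin / jsmn_s.bin FROM THE INTERPRETER'S LITERAL START MACHINE — to a processor that HAS HALTED AND STAYS HALTED with jsmn_main's
  output at 400000H (the method is that of Prog/Inflate/Inst4Image.lean / Inst4Stub.lean and Prog/Deflate/StartInst*.lean, whose
  generic lemmas — `le64`, `zeros`, `read64_le64`, `CodeAt.split` of X86/Derived/Prog/ImageFile.lean, re-exported by Prog/Inflate/Inst4Image.lean — are used as they are; the start machine and
  its user state are X86/Derived/User/Start.lean; the final HLT is X86/Derived/Prog/Halt.lean). Written ONCE for a `Bin` `b` with its `Stub b`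
  (Prog/Jsmn/Start.lean).

  `proofs/c6/harness.py: model_main(k, js, ntok)` writes the file that `interp` loads at 100000H (file offset = address - 100000H):
        100000H  jsmn_k.bin (1579 / 2192 bytes = `b.image`: the stub _start_jsmn, the 8 functions, _start_call6, [the jump table])
        1FF000H  `struct.pack("<4Q", JS = 200000H, len(js), OUT = 400000H, ntok)`        -> rdi rsi rdx rcx
        1FF020H  40 zero bytes (+20H: the stub stores rax there; +30H .. +48H: a4, a5, fn of _start_call6, all 0 for `main`)
        200000H  the text (at most INMAX = 1FF000H bytes); THE FILE ENDS WITH IT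
  and nothing else: 3FFFF8H (the second result slot), the output buffer 400000H .. and the stack below 800000H are plain RAM beyond the end of the
  file: they read 0 (`jsmnStart_zero`). It runs     interp FILE --mode 64 --base 0x100000 --entry 0x100000 --esp 0x800000 --mem-mb 16 ...
  `jsmnImageBytes b js N` is that file as a Lean byte list; `jsmnStart b c js N` = `User.startMachine c (that file) 100000H 800000H` is THE LITERAL
  MACHINE at privilege level `c` (0 = what `Interp.setup` builds: `jsmnStart_setup`; the stub ends in HLT, which needs ring 0); the page tables'
  Accessed / Dirty flags are clear, nothing is preset. `jsmnState b c js N` = `User.startState …` is its user state: what a program proof sees of it.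

    jsmnStart_frame           `User.Abs (User.startLayout c hc) (jsmnStart …) (jsmnState …)`: the start machine is in the user relation with its state
    jsmnStart_image / _args / _input / _zero / _rsp / _rip / _setup      the start machine's user state
    jsmnStart_layout          its state shows `Layout b _ js N` (Prog/Jsmn/Start.lean): every hypothesis of jsmn_main's contract then holds (`main_pre`)
    main_from_start_cpl       machine level, c = 0 or 3: `X86.run` with the model's real decoder, any `μ` with `MicroOK μ`, from the literal start machine to the
                              stub's `hlt` (100035H) with rax = |out| and out = `encodeResult b.cfg r ts'` at 400000H
    halts_with                a machine at a final HLT at ring 0 with `out` at 400000H and |out| in rax: the run has halted and stays halted with output `out`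
    outputs_of_model          `OnX86.Outputs μ (programOf b N) js (encodeResult b.cfg r ts')` for WHATEVER the model answers (r, ts') on the zero token array
  The one hypothesis about the binary is `hmain : MainSpec b (User.startLayout c hc)` (the contract of jsmn_main on the start machine's layout:
  eight 2 MB pages, privilege level `c`; Prog/Jsmn/Specs.lean).
  Nothing admitted, no axiom, no `native_decide`, no `bv_decide` in this file.
-/
import Prog.Jsmn.Start
import Prog.Inflate.Inst4Image
import X86.Derived.Prog.Halt
import X86.Derived.Prog.Harness

namespace X86
namespace J6
namespace Start
open X86.User (CodeAt RegsKept Span FlagsOK Layout toNat_add_ofNat toNat_ofNat_lt' add_ofNat_add)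
open Inst4 Jsmn

set_option maxRecDepth 100000
set_option maxHeartbeats 4000000
set_option linter.unusedSimpArgs false
set_option linter.unusedVariables false

/-- harness.py's INMAX = PARSER - JS = 3FF000H - 200000H. -/
def INMAX : Nat := 0x1FF000

/-! ### The file -/

/-- The parameter block at 1FF000H .. 1FF048H: {JS = 200000H, len, OUT = 400000H, num_tokens}, then 40 zero bytes. -/
def jsmnParamBytes (len N : Nat) : List UInt8 :=
  le64 0x200000 ++ (le64 (UInt64.ofNat len) ++ (le64 0x400000 ++ (le64 (UInt64.ofNat N) ++ zeros 40)))

theorem jsmnParamBytes_length (len N : Nat) : (jsmnParamBytes len N).length = 72 := by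
  simp only [jsmnParamBytes, List.length_append, zeros_length, le64_length]

/-- `harness.py: model_main`'s file for the text `js` and `num_tokens = N`. -/
def jsmnImageBytes (b : Bin) (js : List UInt8) (N : Nat) : List UInt8 :=
  b.image ++ (zeros (0xFF000 - b.image.length) ++ (jsmnParamBytes js.length N ++ (zeros (0x1000 - 72) ++ js)))

def jsmnImage (b : Bin) (js : List UInt8) (N : Nat) : ByteArray := ⟨(jsmnImageBytes b js N).toArray⟩

section
variable {b : Bin} (hs : Stub b) (c : Nat) (js : List UInt8) (N : Nat)
include hs

theorem jsmnImageBytes_length : (jsmnImageBytes b js N).length = 0x100000 + js.length := by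
  have := hs.len
  simp only [jsmnImageBytes, List.length_append, zeros_length, jsmnParamBytes_length]
  omega

theorem jsmnImage_size : (jsmnImage b js N).size = 0x100000 + js.length := by
  show (jsmnImageBytes b js N).toArray.size = _
  rw [List.size_toArray, jsmnImageBytes_length hs]

end

/-! ### The start machine -/

/-- `interp FILE --mode 64 --base 0x100000 --entry 0x100000 --esp 0x800000 --mem-mb 16` on `harness.py`'s file for
`jsmn_main(200000H, |js|, 400000H, N)`, at privilege level `c`: THE LITERAL MACHINE (`User.startMachine`: `Boot.longModeIdent
Interp.interpConfig c 16`, the file loaded at 1 MB, RSP and RIP set); the page tables' Accessed / Dirty flags are CLEAR, nothing is preset. -/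
def jsmnStart (b : Bin) (c : Nat) (js : List UInt8) (N : Nat) : Machine :=
  User.startMachine c (jsmnImage b js N) 0x100000 0x800000

/-- The user state of the start machine: what a program proof sees of it (registers, RIP, RFLAGS, flat memory). -/
def jsmnState (b : Bin) (c : Nat) (js : List UInt8) (N : Nat) : User.State :=
  User.startState c (jsmnImage b js N) 0x100000 0x800000

section
variable {b : Bin} (hs : Stub b) (c : Nat) (js : List UInt8) (N : Nat)

theorem jsmnStart_rsp : (jsmnState b c js N).reg .rsp = 0x800000 := User.startState_rsp c _ _ _

theorem jsmnStart_rip : (jsmnState b c js N).rip = 0x100000 := User.startState_rip c _ _ _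

include hs

/-- **The literal start machine is in the user relation with its user state** (16 MB = eight 2 MB pages mapped), at ring 0 and at ring 3. -/
theorem jsmnStart_frame (hc : c = 0 ∨ c = 3) (hjs : js.length ≤ INMAX) :
    User.Abs (User.startLayout c hc) (jsmnStart b c js N) (jsmnState b c js N) :=
  User.start_abs c hc _ _ _ (by rw [jsmnImage_size hs]; unfold INMAX at hjs; omega)

theorem jsmn_len_le (hjs : js.length ≤ INMAX) : (jsmnImageBytes b js N).length ≤ 0xF00000 := by
  rw [jsmnImageBytes_length hs]; unfold INMAX at hjs; omega

/-- **The image is in the start state's memory at 100000H.** -/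
theorem jsmnStart_image (hc : c = 0 ∨ c = 3) (hjs : js.length ≤ INMAX) : CodeAt (jsmnState b c js N).mem 0x100000 b.image := by
  exact User.startState_segment c hc (jsmnImageBytes b js N) [] b.image
    (zeros (0xFF000 - b.image.length) ++ (jsmnParamBytes js.length N ++ (zeros (0x1000 - 72) ++ js)))
    0x100000 (by simp only [jsmnImageBytes, List.nil_append]) (jsmn_len_le hs js N hjs) (by rfl)

/-- The parameter block is at 1FF000H. -/
theorem jsmnStart_params (hc : c = 0 ∨ c = 3) (hjs : js.length ≤ INMAX) :
    CodeAt (jsmnState b c js N).mem 0x1ff000 (jsmnParamBytes js.length N) := by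
  have := hs.len
  exact User.startState_segment c hc (jsmnImageBytes b js N) (b.image ++ zeros (0xFF000 - b.image.length))
    (jsmnParamBytes js.length N) (zeros (0x1000 - 72) ++ js)
    0x1ff000 (by simp only [jsmnImageBytes, List.append_assoc]) (jsmn_len_le hs js N hjs)
    (by simp only [List.length_append, zeros_length, UInt64.reduceToNat]; omega)

/-- **The text is at 200000H.** -/
theorem jsmnStart_input (hc : c = 0 ∨ c = 3) (hjs : js.length ≤ INMAX) : CodeAt (jsmnState b c js N).mem 0x200000 js := by
  have := hs.len
  exact User.startState_segment c hc (jsmnImageBytes b js N)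
    (b.image ++ (zeros (0xFF000 - b.image.length) ++ (jsmnParamBytes js.length N ++ zeros (0x1000 - 72))))
    js [] 0x200000 (by simp only [jsmnImageBytes, List.append_assoc, List.append_nil]) (jsmn_len_le hs js N hjs)
    (by simp only [List.length_append, zeros_length, jsmnParamBytes_length, UInt64.reduceToNat]; omega)

/-- **Everything from the end of the text on reads 0** (the file ends with the text; unwritten RAM reads 0): the result slot 3FFFF8H, the output
buffer (so: the token array starts as zero tokens), the stack. -/
theorem jsmnStart_zero (hc : c = 0 ∨ c = 3) (hjs : js.length ≤ INMAX) (a : Word) (ha : 0x200000 + js.length ≤ a.toNat) :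
    (jsmnState b c js N).mem.read a = 0 := by
  exact User.startState_beyond_zero c hc (jsmnImageBytes b js N) _ _ (jsmn_len_le hs js N hjs) a (by rw [jsmnImageBytes_length hs]; omega)

/-- The four arguments, as `_start_jsmn`'s loads read them. -/
theorem jsmnStart_args (hc : c = 0 ∨ c = 3) (hjs : js.length ≤ INMAX) :
    let μ := (jsmnState b c js N).mem
    UInt64.ofNat (μ.readLE 0x1ff000 8) = 0x200000 ∧ UInt64.ofNat (μ.readLE 0x1ff008 8) = UInt64.ofNat js.length ∧
    UInt64.ofNat (μ.readLE 0x1ff010 8) = 0x400000 ∧ UInt64.ofNat (μ.readLE 0x1ff018 8) = UInt64.ofNat N := by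
  intro μ
  have h := jsmnStart_params hs c js N hc hjs
  unfold jsmnParamBytes at h
  obtain ⟨h0, h⟩ := CodeAt.split h
  obtain ⟨h1, h⟩ := CodeAt.split h
  obtain ⟨h2, h⟩ := CodeAt.split h
  obtain ⟨h3, _⟩ := CodeAt.split h
  simp only [le64_length] at h1 h2 h3
  exact ⟨read64_le64 h0, read64_le64 (a := 0x1ff008) h1, read64_le64 (a := 0x1ff010) h2, read64_le64 (a := 0x1ff018) h3⟩

/-- **The user state of the literal start machine shows harness.py's layout.** -/
theorem jsmnStart_layout (hc : c = 0 ∨ c = 3) (hjs : js.length ≤ INMAX) : Layout b (jsmnState b c js N) js N := by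
  obtain ⟨g0, g1, g2, g3⟩ := jsmnStart_args hs c js N hc hjs
  exact ⟨jsmnStart_rip c js N, jsmnStart_rsp c js N, jsmnStart_image hs c js N hc hjs, g0, g1, g2, g3, jsmnStart_input hs c js N hc hjs,
    fun a ha => jsmnStart_zero hs c js N hc hjs a ha⟩

/-- `jsmnStart b 0 js N` is, literally, the machine `Interp.setup` returns for `harness.py`'s command line
`interp FILE --mode 64 --base 0x100000 --entry 0x100000 --esp 0x800000 --mem-mb 16` on `harness.py`'s file (the interpreter starts at ring 0). -/
theorem jsmnStart_setup (image : String) (hjs : js.length ≤ INMAX) :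
    Interp.setup { image := image, mode := 64, base := 0x100000, entry := some 0x100000, esp := 0x800000 } (jsmnImage b js N) =
      .ok (jsmnStart b 0 js N) :=
  User.setup_eq image _ 0x100000 0x800000 (by rw [jsmnImage_size hs]; unfold INMAX at hjs; omega) (by decide)

end

/-! ### The run, machine level -/

section
variable {b : Bin} (hs : Stub b) (c : Nat) (hc : c = 0 ∨ c = 3) (hmain : MainSpec b (User.startLayout c hc)) (μ : Microarch) (hμ : MicroOK μ) (ub : Nat → Bool)
  (js : List UInt8) (N : Nat) (hjs : js.length ≤ INMAX) (hN : 4 + b.cfg.tokSize * N ≤ 0x3F8000)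
  {fuel : Nat} {r : Int} {p' : Parser} {ts' : Tokens}
  (hmodel : parseFuel b.cfg fuel js Parser.init (some (zeroToks N)) N = some (r, p', some ts')) (hr : 0 ≤ r → r ≤ N)
include hs hmain hμ hjs hN hmodel hr

/-- **FROM THE INTERPRETER'S LITERAL START STATE** (any privilege level of the frame: c = 0 or 3): for every text `js` of at most INMAX = 1FF000H
bytes and every `N` with 4 + sizeof(jsmntok_t) * N ≤ 3F8000H, `X86.run` with the model's real decoder (any `μ` with `MicroOK μ`) from the machine `interp`
builds for harness.py's file (page tables' A/D flags clear, NO preset) runs the stub's four loads and its `call`, the compiled jsmn_main (jsmn_init,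
jsmn_parse, the result stored), the two stores of rax, and stands at the stub's `hlt` (100035H) with RSP = 800000H, rax = the number of output bytes
and the output `encodeResult b.cfg r ts'` at 400000H — for whatever the model answers. The machine `m'` is in the user relation with a user state
`v'` that says so; the system part of the machine is untouched. -/
theorem main_from_start_cpl :
    ∃ k m' v', _root_.X86.run (Dec.decoder μ (Dec.mkTable X86.allRows)) ((jsmnStart b c js N).withUnknownBits ub) k = .next m' ∧
      User.Abs (User.startLayout c hc) m' v' ∧
      (v'.rip = 0x100035 ∧ v'.reg .rsp = 0x800000 ∧ v'.reg .rax = UInt64.ofNat (encodeResult b.cfg r ts').length ∧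
        CodeAt v'.mem 0x400000 (encodeResult b.cfg r ts') ∧ CodeAt v'.mem 0x100000 b.image ∧
        CodeAt v'.mem 0x100035 [0xF4]) ∧
      m'.sysPart = ((jsmnStart b c js N).withUnknownBits ub).sysPart := by
  have hjs' : js.length ≤ 0x1FF000 := hjs
  have hreach := main_from_start_reach (n := User.startLayout c hc) rfl hs hmain (jsmnStart_layout hs c js N hc hjs) hjs' hN hmodel hr
  exact hreach.sound μ hμ ((jsmnStart b c js N).withUnknownBits ub) ((jsmnStart_frame hs c js N hc hjs).withUnknownBits ub)

end

/-! ### The final HLT: the output -/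

/-- A machine that has reached a final HLT with `out` at 400000H and its length in rax: the run halts with output `out`
(the form of `X86.RoundTrip.halts_with`, Prog/RoundTrip/Runs.lean; the hypothesis `H` is what `Halt.run_hlt_halted` gives). -/
theorem halts_with {L : User.Layout} {dec : Decoder} {m0 m' : Machine} {v' : User.State} {k : Nat} {out : List UInt8}
    (hk : _root_.X86.run dec m0 k = .next m')
    (H : ∀ j, 1 ≤ j → ∃ mj, _root_.X86.run dec m' j = .next mj ∧ mj.activity = .halted ∧ mj.regs = v'.regs ∧
      (∀ a, L.user a → mj.phys.read a = v'.mem.read a))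
    (hL : 0x800000 ≤ L.pages * 0x200000)
    (hrax : v'.reg .rax = UInt64.ofNat out.length) (hlen : out.length < 0x400000)
    (hout : CodeAt v'.mem 0x400000 out) :
    ∃ K, ∀ j, K ≤ j → ∃ m, _root_.X86.run dec m0 j = .next m ∧ m.activity = .halted ∧ OnX86.readOut m = out := by
  refine ⟨k + 1, fun j hj => ?_⟩
  obtain ⟨mj, hrun, hact, hregs, hmem⟩ := H (j - k) (by omega)
  refine ⟨mj, ?_, hact, ?_⟩
  · have := run_add dec m0 m' k (j - k) hk
    rw [show k + (j - k) = j by omega] at this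
    rw [this, hrun]
  · have hr : mj.reg .rax = UInt64.ofNat out.length := by
      rw [← hrax]; unfold Machine.reg User.State.reg; rw [hregs]
    have hn : (mj.reg .rax).toNat = out.length := by
      rw [hr, UInt64.toNat_ofNat']; exact Nat.mod_eq_of_lt (by omega)
    unfold OnX86.readOut
    rw [hn]
    apply List.ext_getElem (by simp)
    intro i h1 h2
    simp only [List.getElem_map, List.getElem_range]
    have hi : i < out.length := h2
    have ha : ((0x400000 : Word) + UInt64.ofNat i).toNat = 0x400000 + i := toNat_add_ofNat _ _ (by simp only [UInt64.reduceToNat]; omega)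
    have hu : L.user ((0x400000 : Word) + UInt64.ofNat i) := by
      unfold User.Layout.user User.Layout.lo User.Layout.hi
      rw [ha]
      omega
    rw [hmem _ hu]
    exact hout i hi

/-- The harness's program for the image `b` with `num_tokens = N`: how the memory file is laid out around a text, entry 100000H, stack 800000H. -/
def programOf (b : Bin) (N : Nat) : OnX86.Program := ⟨fun js => jsmnImage b js N, 0x100000, 0x800000⟩

section
variable {b : Bin} (hs : Stub b) (hmain : MainSpec b (User.startLayout 0 (Or.inl rfl))) (μ : Microarch) (hμ : MicroOK μ) (ub : Nat → Bool)
  (js : List UInt8) (N : Nat) (hjs : js.length ≤ INMAX) (hN : 4 + b.cfg.tokSize * N ≤ 0x3F8000)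
  {fuel : Nat} {r : Int} {p' : Parser} {ts' : Tokens}
  (hmodel : parseFuel b.cfg fuel js Parser.init (some (zeroToks N)) N = some (r, p', some ts')) (hr : 0 ≤ r → r ≤ N)
include hs hmain hμ hjs hN hmodel hr

/-- **THE RUN HALTS WITH THE MODEL'S ANSWER AS ITS OUTPUT**: from the interpreter's ring-0 start machine for harness.py's file, with any UNKNOWN stream `ub` (`Machine.withUnknownBits`), the processor
HALTS AND STAYS HALTED with `encodeResult b.cfg r ts'` (the result `r` as a little-endian int, then — if `r ≥ 0` — the first `r` tokens) at 400000H
and its length in rax, where `(r, ts')` is whatever the pure model of jsmn_parse answers from a fresh parser on `N` zero tokens. -/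
theorem outputs_of_model : OnX86.Outputs μ (programOf b N) ub js (encodeResult b.cfg r ts') := by
  obtain ⟨k, m', v', hk, ha, ⟨hrip, _, hrax, hout, _, hhlt⟩, _⟩ :=
    main_from_start_cpl hs 0 (Or.inl rfl) hmain μ hμ ub js N hjs hN hmodel hr
  have hlen := encodeResult_length_le b.cfg r ts' N hr
  refine ⟨(jsmnStart b 0 js N).withUnknownBits ub,
    OnX86.start_of_setup (p := programOf b N) (input := js) (jsmnStart_setup hs js N "" hjs) ub, ?_⟩
  have hhlt' : CodeAt v'.mem v'.rip [0xF4] := by rw [hrip]; exact hhlt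
  have hhas : (User.startLayout 0 (Or.inl rfl)).Has v'.rip 15 := by
    rw [hrip]
    unfold User.Layout.Has User.Layout.lo User.Layout.hi
    decide
  have H := Halt.run_hlt_halted (L := User.startLayout 0 (Or.inl rfl)) rfl μ hμ ha hhlt' hhas
  refine halts_with (L := User.startLayout 0 (Or.inl rfl)) hk (fun j hj => ?_) (by decide) hrax (by omega) hout
  obtain ⟨mj, h1, hq, h3, _, _, _, h7⟩ := H j hj
  exact ⟨mj, h1, hq.activity, h3, h7⟩

end

end Start
end J6
end X86

#print axioms X86.J6.Start.main_from_start_cpl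
#print axioms X86.J6.Start.outputs_of_model
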